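-- pv_equiv track=rewrite | github.com/delight-es/Algorithm_Python | 프로그래머스/2/42586. 기능개발/기능개발.py | solution
-- ===== SOURCE A (Python) =====
-- from collections import deque #선입선출
--
-- def solution(progresses, speeds):
--     answer, q = [], deque(progresses)
--     while len(q) >= 1:
--         job = 0
--         # 한 작업씩 작업 일 추가
--         for i in range(len(q)):
--             q[i] += speeds[i]
--         # 모든 작업에 대해
--         for _ in range(len(q)):
--             if q[0] >= 100: #앞선 작업이 100 넘으면
--                 q.popleft() #삭제
--                 speeds.pop(0)
--                 job += 1 # 개수+1
--             else: #못 넘으면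
--                 break
--         if job != 0:
--             answer.append(job)
--     return answer
-- ===== SOURCE B (Python) =====
-- def solution(progresses, speeds):
--     # One pass: compute each job's finish day (>= 1) in closed form, then group
--     # consecutive jobs whose day does not exceed the current group's release day.
--     answer = []
--     cur = 0
--     count = 0
--     for p, s in zip(progresses, speeds):
--         d = max(1, -((p - 100) // s))
--         if d > cur:
--             if count:
--                 answer.append(count)
--             cur = d
--             count = 1
--         else:
--             count += 1
--     if count:
--         answer.append(count)
--     return answer
-- ===== Notes on version B (the rewrite author's own statement) =====
-- stated objective: alternative
-- what changed: Instead of simulating the work day by day on a deque (adding speeds and popping finished jobs each day, O(n*D) steps), B computes each job's finish day in closed form with one ceiling division and groups consecutive jobs in a single left-to-right pass by the running maximum finish day; intended as asymptotically faster, but a timing run could not take a clean reading (A times out already on small inputs).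
-- outside the precondition, e.g. on solution([100], [0]): A returns [1], B raises ZeroDivisionError; on solution([150, 0], [-10, 50]): A returns [1, 1], B returns [2]
import Mathlib
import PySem

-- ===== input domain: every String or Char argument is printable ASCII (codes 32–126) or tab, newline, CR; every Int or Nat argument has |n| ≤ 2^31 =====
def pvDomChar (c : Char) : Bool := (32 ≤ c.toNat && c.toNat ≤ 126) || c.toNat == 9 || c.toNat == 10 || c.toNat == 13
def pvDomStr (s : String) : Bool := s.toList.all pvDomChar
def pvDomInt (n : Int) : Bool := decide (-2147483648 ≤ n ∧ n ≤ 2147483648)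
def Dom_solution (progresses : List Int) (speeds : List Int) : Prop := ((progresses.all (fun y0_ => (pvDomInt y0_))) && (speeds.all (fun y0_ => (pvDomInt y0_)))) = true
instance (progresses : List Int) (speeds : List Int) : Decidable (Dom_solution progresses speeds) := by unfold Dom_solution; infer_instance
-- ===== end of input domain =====

-- B differs from A in side effects only outside the return value: A destructively pops from `speeds`
-- (the caller's list); B never mutates its arguments. The equivalence proved here is about the return value.

-- ===== PORT A =====
-- A's inner `for _ in range(len(q)): if q[0] >= 100: popleft; speeds.pop(0); job += 1 else break`:
-- pops the maximal finished prefix (at most len q iterations, which the recursion matches).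
def popPhase : List Int → List Int → Int × List Int × List Int
  | [], sp => (0, [], sp)
  | x :: q, sp =>
    if 100 ≤ x then
      let r := popPhase q sp.tail
      (r.1 + 1, r.2.1, r.2.2)
    else (0, x :: q, sp)

-- fuel bound for A's while-loop (a totality guard only; proved sufficient under Pre_ below)
def fuelFor : List Int → Nat
  | [] => 1
  | p :: q => (100 - p).toNat + 1 + fuelFor q

-- the while-loop: add a day of speed to every job, pop the finished prefix, record the batch
def loopA : Nat → List Int → List Int → List Int → List Int
  | 0, _, _, ans => ans
  | fuel + 1, q, sp, ans =>
    if 1 ≤ q.length then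
      loopA fuel (popPhase (List.zipWith (· + ·) q sp) sp).2.1
        (popPhase (List.zipWith (· + ·) q sp) sp).2.2
        (if (popPhase (List.zipWith (· + ·) q sp) sp).1 ≠ 0 then
          ans ++ [(popPhase (List.zipWith (· + ·) q sp) sp).1]
        else ans)
    else ans

def solution (progresses : List Int) (speeds : List Int) : List Int :=
  loopA (fuelFor progresses) progresses speeds []

-- ===== PORT B =====
-- finish day of a job: max(1, -((p - 100) // s)), i.e. ceil((100-p)/s) but at least one day
def daysFor (p s : Int) : Int := max 1 (-(PySem.Int.floordiv (p - 100) s))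

-- the single grouping pass of Source B: state (cur, count, answer)
def scanB : List Int → Int → Int → List Int → List Int
  | [], _, count, ans => if count ≠ 0 then ans ++ [count] else ans
  | d :: rest, cur, count, ans =>
    if cur < d then scanB rest d 1 (if count ≠ 0 then ans ++ [count] else ans)
    else scanB rest cur (count + 1) ans

def solution_alt (progresses : List Int) (speeds : List Int) : List Int :=
  scanB ((progresses.zip speeds).map fun pr => daysFor pr.1 pr.2) 0 0 []

-- ===== PRECONDITION & SPEC =====
-- Pre_ excludes inputs with a non-positive paired speed, on which A loops forever except in
-- accidental corners where a stalled job already sits at >= 100 when it reaches the front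
-- (there B's ceiling-division day is undefined for s = 0 and meaningless for s < 0), and inputs
-- where speeds is shorter than progresses, on which A raises IndexError.
def Pre_solution (progresses : List Int) (speeds : List Int) : Prop :=
  progresses.length ≤ speeds.length ∧ ∀ pr ∈ progresses.zip speeds, 0 < pr.2
instance (progresses : List Int) (speeds : List Int) : Decidable (Pre_solution progresses speeds) := by unfold Pre_solution; infer_instance

def pvWitness_solution : List Int × List Int := ([93, 30, 55], [1, 30, 5])


def Spec_solution (progresses : List Int) (speeds : List Int) (out : List Int) : Prop := out = solution_alt progresses speeds
instance (progresses : List Int) (speeds : List Int) (out : List Int) : Decidable (Spec_solution progresses speeds out) := by unfold Spec_solution; infer_instance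

-- ===== CLAIM (what is proved, stated in full; the proofs are below) =====
def Claim_equal_solution : Prop := ∀ (progresses : List Int) (speeds : List Int), Dom_solution progresses speeds → Pre_solution progresses speeds → Spec_solution progresses speeds (solution progresses speeds)

-- ===== LEMMAS AND PROOFS =====

-- days list of a job state
def daysList (q sp : List Int) : List Int := (q.zip sp).map fun pr => daysFor pr.1 pr.2

-- one-day decrement on a finish day
def dec (d : Int) : Int := max 1 (d - 1)

def sumD (D : List Int) : Nat := (D.map Int.toNat).sum

lemma daysFor_one_le (p s : Int) : 1 ≤ daysFor p s := le_max_left _ _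

lemma daysFor_eq_one_iff (p s : Int) (hs : 0 < s) : daysFor p s = 1 ↔ 100 ≤ p + s := by
  have h := PySem.Int.le_floordiv_iff_mul_le (a := p - 100) (b := s) (q := -1) hs
  unfold daysFor
  constructor
  · intro h1
    have h2 : -1 ≤ PySem.Int.floordiv (p - 100) s := by omega
    have := h.mp h2; omega
  · intro h1
    have := h.mpr (by omega); omega

lemma floordiv_add_self (p s : Int) (hs : 0 < s) :
    PySem.Int.floordiv (p + s) s = PySem.Int.floordiv p s + 1 := by
  have h := (PySem.Int.floordiv_eq_iff_of_pos (a := p) (b := s)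
      (q := PySem.Int.floordiv p s) hs).mp rfl
  refine (PySem.Int.floordiv_eq_iff_of_pos hs).mpr ⟨?_, ?_⟩
  · have := h.1; nlinarith
  · have := h.2; nlinarith

lemma daysFor_add (p s : Int) (hs : 0 < s) : daysFor (p + s) s = dec (daysFor p s) := by
  have h1 : p + s - 100 = (p - 100) + s := by ring
  unfold daysFor dec
  rw [h1, floordiv_add_self _ _ hs]
  omega

lemma daysFor_toNat_le (p s : Int) (hs : 0 < s) : (daysFor p s).toNat ≤ (100 - p).toNat + 1 := by
  unfold daysFor
  by_cases hp : 100 ≤ p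
  · have h0 : (0 : Int) ≤ PySem.Int.floordiv (p - 100) s :=
      (PySem.Int.le_floordiv_iff_mul_le hs).mpr (by omega)
    omega
  · have ha : (p - 100) ≤ PySem.Int.floordiv (p - 100) s := by
      refine (PySem.Int.le_floordiv_iff_mul_le hs).mpr ?_
      nlinarith
    omega

lemma popPhase_eq (q : List Int) : ∀ sp : List Int,
    popPhase q sp =
      (((q.takeWhile fun x => 100 ≤ x).length : Int),
        q.dropWhile fun x => 100 ≤ x,
        sp.drop (q.takeWhile fun x => 100 ≤ x).length) := by
  induction q with
  | nil => intro sp; simp [popPhase]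
  | cons x q ih =>
    intro sp
    by_cases h : 100 ≤ x
    · rw [List.takeWhile_cons_of_pos (by simpa using h),
        List.dropWhile_cons_of_pos (by simpa using h)]
      have h3 : sp.tail.drop (List.takeWhile (fun x => decide (100 ≤ x)) q).length
          = sp.drop ((List.takeWhile (fun x => decide (100 ≤ x)) q).length + 1) := by
        rw [← List.drop_one, List.drop_drop, Nat.add_comm]
      simp [popPhase, h, ih sp.tail, h3]
    · rw [List.takeWhile_cons_of_neg (by simpa using h),
        List.dropWhile_cons_of_neg (by simpa using h)]
      simp [popPhase, h]

lemma dec_pos_iff (d cur : Int) (h1 : 1 ≤ d) (hcur : 2 ≤ cur) : (cur - 1 < dec d) ↔ (cur < d) := by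
  unfold dec; omega

lemma scan_dec (D : List Int) : ∀ (cur count : Int) (ans : List Int), 2 ≤ cur → (∀ d ∈ D, 1 ≤ d) →
    scanB (D.map dec) (cur - 1) count ans = scanB D cur count ans := by
  induction D with
  | nil => intro cur count ans _ _; rfl
  | cons d R ih =>
    intro cur count ans hcur h1
    have hd : 1 ≤ d := h1 d (by simp)
    have hR : ∀ x ∈ R, 1 ≤ x := fun x hx => h1 x (by simp [hx])
    by_cases h : cur < d
    · have hcond : cur - 1 < dec d := (dec_pos_iff d cur hd hcur).mpr h
      have hdec : dec d = d - 1 := by unfold dec; omega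
      simp only [List.map_cons, scanB]
      rw [if_pos hcond, if_pos h, hdec]
      exact ih d 1 _ (by omega) hR
    · have hcond : ¬ (cur - 1 < dec d) := fun hc => h ((dec_pos_iff d cur hd hcur).mp hc)
      simp only [List.map_cons, scanB]
      rw [if_neg hcond, if_neg h]
      exact ih cur (count + 1) ans hcur hR

lemma scan_ones (D : List Int) : ∀ (c : Int) (ans : List Int), 1 ≤ c → (∀ d ∈ D, 1 ≤ d) →
    scanB D 1 c ans =
      scanB ((D.dropWhile fun d => d = 1).map dec) 0 0
        (ans ++ [c + ((D.takeWhile fun d => d = 1).length : Int)]) := by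
  induction D with
  | nil =>
    intro c ans hc _
    simp only [List.dropWhile_nil, List.takeWhile_nil, List.map_nil, scanB,
      List.length_nil, Nat.cast_zero, add_zero]
    rw [if_pos (by omega : c ≠ 0), if_neg (by omega : ¬ ((0:Int) ≠ 0))]
  | cons d R ih =>
    intro c ans hc h1
    have hd : 1 ≤ d := h1 d (by simp)
    have hR : ∀ x ∈ R, 1 ≤ x := fun x hx => h1 x (by simp [hx])
    by_cases h : d = 1
    · subst h
      rw [List.takeWhile_cons_of_pos (by simp), List.dropWhile_cons_of_pos (by simp)]
      simp only [scanB]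
      rw [if_neg (by omega : ¬ ((1:Int) < 1))]
      rw [ih (c + 1) ans (by omega) hR]
      simp only [List.length_cons]
      congr 2
      push_cast; ring
    · have h2 : (2:Int) ≤ d := by omega
      rw [List.takeWhile_cons_of_neg (by simpa using h),
        List.dropWhile_cons_of_neg (by simpa using h)]
      simp only [scanB, List.map_cons, List.length_nil, Nat.cast_zero, add_zero]
      rw [if_pos (by omega : (1:Int) < d), if_pos (by omega : c ≠ 0),
        if_pos (by unfold dec; omega : (0:Int) < dec d),
        if_neg (by omega : ¬ ((0:Int) ≠ 0))]
      have hdec : dec d = d - 1 := by unfold dec; omega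
      rw [hdec]
      exact (scan_dec R d 1 (ans ++ [c]) h2 hR).symm

lemma scan_step (D : List Int) (ans : List Int) (hne : D ≠ []) (h1 : ∀ d ∈ D, 1 ≤ d) :
    scanB D 0 0 ans =
      scanB ((D.dropWhile fun d => d = 1).map dec) 0 0
        (if ((D.takeWhile fun d => d = 1).length : Int) ≠ 0 then
          ans ++ [((D.takeWhile fun d => d = 1).length : Int)]
        else ans) := by
  match D with
  | d :: R =>
    have hd : 1 ≤ d := h1 d (by simp)
    have hR : ∀ x ∈ R, 1 ≤ x := fun x hx => h1 x (by simp [hx])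
    by_cases h : d = 1
    · subst h
      rw [List.takeWhile_cons_of_pos (by simp), List.dropWhile_cons_of_pos (by simp)]
      simp only [scanB]
      rw [if_pos (by omega : (0:Int) < 1), if_neg (by omega : ¬ ((0:Int) ≠ 0))]
      rw [scan_ones R 1 ans (by omega) hR]
      simp only [List.length_cons]
      rw [if_pos (by push_cast; omega)]
      have hcast : (1 : Int) + ((R.takeWhile fun d => d = 1).length : Int)
          = (((R.takeWhile fun d => d = 1).length + 1 : Nat) : Int) := by push_cast; ring
      rw [hcast]
    · have h2 : (2:Int) ≤ d := by omega
      rw [List.takeWhile_cons_of_neg (by simpa using h),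
        List.dropWhile_cons_of_neg (by simpa using h)]
      simp only [List.map_cons, scanB, List.length_nil, Nat.cast_zero]
      rw [if_neg (by omega : ¬ ((0:Int) ≠ 0)), if_pos (by omega : (0:Int) < d),
        if_pos (by unfold dec; omega : (0:Int) < dec d)]
      have hdec : dec d = d - 1 := by unfold dec; omega
      rw [hdec]
      exact (scan_dec R d 1 ans h2 hR).symm

lemma dropWhile_eq_drop_len {α : Type} (p : α → Bool) (l : List α) :
    l.dropWhile p = l.drop (l.takeWhile p).length := by
  induction l with
  | nil => rfl
  | cons a l ih =>
    by_cases h : p a = true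
    · rw [List.dropWhile_cons_of_pos h, List.takeWhile_cons_of_pos h, ih]
      simp
    · rw [List.dropWhile_cons_of_neg (by simp [h]), List.takeWhile_cons_of_neg (by simp [h])]
      simp

lemma zip_drop_comm (a : List Int) : ∀ (b : List Int) (n : Nat),
    (a.drop n).zip (b.drop n) = (a.zip b).drop n := by
  induction a with
  | nil => intro b n; simp
  | cons x a ih =>
    intro b n
    cases b with
    | nil => simp
    | cons y b =>
      cases n with
      | zero => simp
      | succ n => simpa using ih b n

lemma daysList_cons (p s : Int) (q sp : List Int) :
    daysList (p :: q) (s :: sp) = daysFor p s :: daysList q sp := rfl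

lemma daysList_drop (q sp : List Int) (n : Nat) :
    daysList (q.drop n) (sp.drop n) = (daysList q sp).drop n := by
  unfold daysList
  rw [zip_drop_comm, List.map_drop]

lemma daysList_length (q sp : List Int) : (daysList q sp).length = min q.length sp.length := by
  simp [daysList]

lemma daysList_one_le (q sp : List Int) : ∀ d ∈ daysList q sp, 1 ≤ d := by
  intro d hd
  simp only [daysList, List.mem_map] at hd
  obtain ⟨pr, _, rfl⟩ := hd
  exact daysFor_one_le pr.1 pr.2

lemma daysList_add (q : List Int) : ∀ sp : List Int, (∀ pr ∈ q.zip sp, 0 < pr.2) →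
    daysList (List.zipWith (· + ·) q sp) sp = (daysList q sp).map dec := by
  induction q with
  | nil => intro sp _; simp [daysList]
  | cons p q ih =>
    intro sp hpos
    cases sp with
    | nil => simp [daysList]
    | cons s sp =>
      have hs : 0 < s := hpos (p, s) (by simp)
      have h' : ∀ pr ∈ q.zip sp, 0 < pr.2 := fun pr hpr => hpos pr (List.mem_cons_of_mem _ hpr)
      rw [show List.zipWith (· + ·) (p::q) (s::sp) = (p+s) :: List.zipWith (· + ·) q sp from rfl,
        daysList_cons, daysList_cons, List.map_cons, daysFor_add p s hs, ih sp h']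

lemma zip_add_pos (q : List Int) : ∀ sp : List Int, (∀ pr ∈ q.zip sp, 0 < pr.2) →
    ∀ pr ∈ (List.zipWith (· + ·) q sp).zip sp, 0 < pr.2 := by
  induction q with
  | nil => intro sp _ pr hpr; simp at hpr
  | cons p q ih =>
    intro sp hpos pr hpr
    cases sp with
    | nil => simp at hpr
    | cons s sp =>
      rw [show List.zipWith (· + ·) (p::q) (s::sp) = (p+s) :: List.zipWith (· + ·) q sp from rfl,
        List.zip_cons_cons, List.mem_cons] at hpr
      rcases hpr with h | h
      · subst h; exact hpos (p, s) (by simp)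
      · exact ih sp (fun x hx => hpos x (List.mem_cons_of_mem _ hx)) pr h

lemma takeWhile_len_eq (q : List Int) : ∀ sp, (∀ pr ∈ q.zip sp, 0 < pr.2) → q.length ≤ sp.length →
    ((List.zipWith (· + ·) q sp).takeWhile fun x => 100 ≤ x).length
      = ((daysList q sp).takeWhile fun d => d = 1).length := by
  induction q with
  | nil => intro sp _ _; simp [daysList]
  | cons p q ih =>
    intro sp hpos hlen
    cases sp with
    | nil => simp at hlen
    | cons s sp =>
      have hs : 0 < s := hpos (p, s) (by simp)
      have h' : ∀ pr ∈ q.zip sp, 0 < pr.2 := fun pr hpr => hpos pr (List.mem_cons_of_mem _ hpr)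
      have hlen' : q.length ≤ sp.length := by simpa using hlen
      rw [show List.zipWith (· + ·) (p::q) (s::sp) = (p+s) :: List.zipWith (· + ·) q sp from rfl,
        daysList_cons]
      by_cases h : 100 ≤ p + s
      · rw [List.takeWhile_cons_of_pos (by simpa using h),
          List.takeWhile_cons_of_pos (by simp [(daysFor_eq_one_iff p s hs).mpr h])]
        simp [ih sp h' hlen']
      · rw [List.takeWhile_cons_of_neg (by simpa using h),
          List.takeWhile_cons_of_neg
            (by simp only [decide_eq_true_eq]; exact fun hh => h ((daysFor_eq_one_iff p s hs).mp hh))]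

lemma sumD_cons (d : Int) (D : List Int) : sumD (d :: D) = d.toNat + sumD D := by
  simp [sumD]

lemma sumD_map_dec_le (D : List Int) (h1 : ∀ d ∈ D, 1 ≤ d) : sumD (D.map dec) ≤ sumD D := by
  induction D with
  | nil => simp [sumD]
  | cons d R ih =>
    have hrec := ih (fun x hx => h1 x (by simp [hx]))
    have hd : 1 ≤ d := h1 d (by simp)
    have hdd : (dec d).toNat ≤ d.toNat := by unfold dec; omega
    rw [List.map_cons, sumD_cons, sumD_cons]
    omega

lemma sumD_dropWhile_le (D : List Int) : sumD (D.dropWhile fun d => d = 1) ≤ sumD D := by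
  induction D with
  | nil => simp
  | cons d R ih =>
    by_cases h : d = 1
    · rw [List.dropWhile_cons_of_pos (by simp [h]), sumD_cons]
      omega
    · rw [List.dropWhile_cons_of_neg (by simp [h])]

lemma sumD_step_lt (D : List Int) (hne : D ≠ []) (h1 : ∀ d ∈ D, 1 ≤ d) :
    sumD ((D.dropWhile fun d => d = 1).map dec) < sumD D := by
  match D with
  | d :: R =>
    have hd : 1 ≤ d := h1 d (by simp)
    have hR : ∀ x ∈ R, 1 ≤ x := fun x hx => h1 x (by simp [hx])
    by_cases h : d = 1
    · rw [List.dropWhile_cons_of_pos (by simp [h]), sumD_cons]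
      have h2 := sumD_map_dec_le (R.dropWhile fun d => d = 1)
        (fun x hx => hR x (by rw [dropWhile_eq_drop_len] at hx; exact List.mem_of_mem_drop hx))
      have h3 := sumD_dropWhile_le R
      omega
    · have h2 : (2:Int) ≤ d := by omega
      rw [List.dropWhile_cons_of_neg (by simp [h]), List.map_cons, sumD_cons, sumD_cons]
      have h3 := sumD_map_dec_le R hR
      have h4 : (dec d).toNat < d.toNat := by unfold dec; omega
      omega

lemma sumD_pos (D : List Int) (hne : D ≠ []) (h1 : ∀ d ∈ D, 1 ≤ d) : 1 ≤ sumD D :=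
  match D with
  | d :: R => by
    rw [sumD_cons]
    have := h1 d (by simp)
    omega

lemma loopA_eq_scanB (fuel : Nat) : ∀ (q sp ans : List Int), q.length ≤ sp.length →
    (∀ pr ∈ q.zip sp, 0 < pr.2) → sumD (daysList q sp) ≤ fuel →
    loopA fuel q sp ans = scanB (daysList q sp) 0 0 ans := by
  induction fuel with
  | zero =>
    intro q sp ans hlen hpos hfuel
    have hq : q = [] := by
      by_contra hq
      have hD : daysList q sp ≠ [] := by
        intro h
        have hl0 : (daysList q sp).length = 0 := by rw [h]; rfl
        rw [daysList_length] at hl0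
        exact hq (List.eq_nil_of_length_eq_zero (by omega))
      have := sumD_pos _ hD (daysList_one_le q sp)
      omega
    subst hq
    simp [loopA, daysList, scanB]
  | succ fuel ih =>
    intro q sp ans hlen hpos hfuel
    by_cases hq : q = []
    · subst hq
      simp [loopA, daysList, scanB]
    · have hlen1 : 1 ≤ q.length := by
        cases q with
        | nil => exact absurd rfl hq
        | cons a q => simp
      have hDne : daysList q sp ≠ [] := by
        intro h
        have hl0 : (daysList q sp).length = 0 := by rw [h]; rfl
        rw [daysList_length] at hl0
        exact hq (List.eq_nil_of_length_eq_zero (by omega))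
      have h1 := daysList_one_le q sp
      simp only [loopA]
      rw [if_pos hlen1, popPhase_eq]
      have hj := takeWhile_len_eq q sp hpos hlen
      have hlenq1 : (List.zipWith (· + ·) q sp).length = q.length := by
        rw [List.length_zipWith]; omega
      -- the new days list
      have hdl : daysList
          ((List.zipWith (· + ·) q sp).dropWhile fun x => 100 ≤ x)
          (sp.drop ((List.zipWith (· + ·) q sp).takeWhile fun x => 100 ≤ x).length)
          = ((daysList q sp).dropWhile fun d => d = 1).map dec := by
        rw [dropWhile_eq_drop_len, daysList_drop, daysList_add q sp hpos, hj,
          ← List.map_drop, ← dropWhile_eq_drop_len]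
      rw [ih _ _ _ ?hl ?hp ?hf]
      · rw [hdl, hj]
        exact (scan_step (daysList q sp) ans hDne h1).symm
      case hl =>
        rw [dropWhile_eq_drop_len, List.length_drop, List.length_drop, hlenq1]
        omega
      case hp =>
        intro pr hpr
        rw [dropWhile_eq_drop_len, zip_drop_comm] at hpr
        exact zip_add_pos q sp hpos pr (List.mem_of_mem_drop hpr)
      case hf =>
        rw [hdl]
        have := sumD_step_lt (daysList q sp) hDne h1
        omega

lemma fuel_ge (q : List Int) : ∀ sp, (∀ pr ∈ q.zip sp, 0 < pr.2) → q.length ≤ sp.length →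
    sumD (daysList q sp) ≤ fuelFor q := by
  induction q with
  | nil => intro sp _ _; simp [daysList, sumD, fuelFor]
  | cons p q ih =>
    intro sp hpos hlen
    cases sp with
    | nil => simp at hlen
    | cons s sp =>
      have hs : 0 < s := hpos (p, s) (by simp)
      rw [daysList_cons, sumD_cons]
      have hb := daysFor_toNat_le p s hs
      have hrec := ih sp (fun pr hpr => hpos pr (List.mem_cons_of_mem _ hpr)) (by simpa using hlen)
      unfold fuelFor
      omega

theorem solution_spec : Claim_equal_solution := by
  intro progresses speeds _ hpre
  unfold Spec_solution solution solution_alt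
  rw [loopA_eq_scanB (fuelFor progresses) progresses speeds [] hpre.1 hpre.2
    (fuel_ge progresses speeds hpre.2 hpre.1)]
  rfl
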